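-- pv_equiv track=rewrite | github.com/La-sociedad-del-silencio/TP2-Dinamica | codigo/algoritmo_matriz.py | eliminar_enemigos
-- ===== SOURCE A (Python) =====
-- CARGAR = "Cargar"
--
-- ATACAR = "Atacar"
--
-- def eliminar_enemigos(x, f):
--     n = len(x)
--     enemigos_eliminados = [[0] * (n + 1) for _ in range(n + 1)]
--
--     for minuto_actual in range(1, n + 1):
--         for minutos_desde_ultimo_ataque in range(1, n + 1):
--
--             if minuto_actual >= minutos_desde_ultimo_ataque:
--
--                 enemigos_ataque_anterior = enemigos_eliminados[minuto_actual-minutos_desde_ultimo_ataque][minuto_actual-minutos_desde_ultimo_ataque]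
--                 enemigos_actuales = min(f[minutos_desde_ultimo_ataque-1], x[minuto_actual-1])
--                 enemigos_atacar_antes = enemigos_eliminados[minuto_actual][minutos_desde_ultimo_ataque-1]
--
--                 enemigos_eliminados[minuto_actual][minutos_desde_ultimo_ataque] = max(enemigos_ataque_anterior +  enemigos_actuales, enemigos_atacar_antes)
--
--     max_enemigos = enemigos_eliminados[-1][-1]
--     secuencia = obtener_secuencia_estrategias(x, f, enemigos_eliminados, n, n, [])
--     secuencia.reverse()
--     return (max_enemigos, secuencia)
--
-- def obtener_secuencia_estrategias(x, f, enemigos_eliminados, minuto_actual, minutos_desde_ultimo_ataque, secuencia):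
--
--     if minuto_actual == 0 or minutos_desde_ultimo_ataque == 0:
--         return secuencia
--
--     enemigos_ataque_anterior = enemigos_eliminados[minuto_actual-minutos_desde_ultimo_ataque][minuto_actual-minutos_desde_ultimo_ataque] if minuto_actual >= minutos_desde_ultimo_ataque else 0
--     enemigos_actuales = min(f[minutos_desde_ultimo_ataque-1], x[minuto_actual-1])
--     enemigos_atacar_antes = enemigos_eliminados[minuto_actual][minutos_desde_ultimo_ataque-1]
--
--     if enemigos_ataque_anterior + enemigos_actuales >= enemigos_atacar_antes:
--         secuencia.append(ATACAR)
--         i = minutos_desde_ultimo_ataque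
--         while i > 1:
--             secuencia.append(CARGAR)
--             i -= 1
--         return obtener_secuencia_estrategias(x, f, enemigos_eliminados, minuto_actual-minutos_desde_ultimo_ataque, minuto_actual-minutos_desde_ultimo_ataque, secuencia)
--     return obtener_secuencia_estrategias(x, f, enemigos_eliminados, minuto_actual, minutos_desde_ultimo_ataque-1, secuencia)
-- ===== SOURCE B (Python) =====
-- CARGAR = "Cargar"
--
-- ATACAR = "Atacar"
--
-- def eliminar_enemigos(x, f):
--     # 1-D DP over the diagonal of A's table: d[m] = best kills in the first m minutes
--     # ending right after an attack (or 0), then a traceback that recomputes each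
--     # attack's gap instead of reading a 2-D table.
--     n = len(x)
--     d = [0]
--     for m in range(1, n + 1):
--         c = x[m - 1]
--         d.append(max([0] + [d[m - j] + min(f[j - 1], c) for j in range(1, m + 1)]))
--     secuencia = []
--     m = n
--     while m > 0:
--         c = x[m - 1]
--         best, arg = 0, 0
--         for j in range(1, m + 1):
--             v = d[m - j] + min(f[j - 1], c)
--             if v >= best:
--                 best, arg = v, j
--         if arg == 0:
--             break
--         secuencia = [CARGAR] * (arg - 1) + [ATACAR] + secuencia
--         m -= arg
--     return (d[n], secuencia)
-- ===== Notes on version B (the rewrite author's own statement) =====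
-- stated objective: faster
-- what changed: B replaces A's (n+1)x(n+1) DP table and recursive table-reading traceback by a 1-D DP over the table's diagonal (O(n) space) plus an iterative traceback that recomputes each attack's best gap by a last-argmax scan and builds the sequence front-first by prepending, with no final reverse.
import Mathlib
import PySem

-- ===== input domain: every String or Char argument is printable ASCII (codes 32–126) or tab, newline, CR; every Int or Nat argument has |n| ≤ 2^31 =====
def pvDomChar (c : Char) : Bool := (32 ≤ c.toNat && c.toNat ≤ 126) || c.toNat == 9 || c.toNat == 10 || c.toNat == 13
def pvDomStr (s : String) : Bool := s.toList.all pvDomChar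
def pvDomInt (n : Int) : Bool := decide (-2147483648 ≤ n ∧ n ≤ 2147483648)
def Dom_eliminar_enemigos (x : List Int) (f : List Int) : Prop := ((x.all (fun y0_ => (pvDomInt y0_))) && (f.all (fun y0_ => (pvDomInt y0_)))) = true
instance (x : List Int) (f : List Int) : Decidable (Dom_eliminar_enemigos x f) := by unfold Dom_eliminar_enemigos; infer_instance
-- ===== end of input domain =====

-- B replaces A's 2-D DP table + recursive traceback by a 1-D diagonal DP (O(n) space) and an
-- iterative prepending traceback that recomputes each attack's gap; return values proved equal.


-- ===== PORT A =====
def pvCARGAR : String := "Cargar"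
def pvATACAR : String := "Atacar"

-- table cell read t[i][j]; indices are in range on every reachable access, so getD's default is never used
def pvCell (t : List (List Int)) (i j : Nat) : Int := (t.getD i []).getD j 0

-- the nested table-fill loops of A (loop variables 1..n as in range(1, n+1))
def pvFillStep (x f : List Int) (m : Nat) (t : List (List Int)) (g : Nat) : List (List Int) :=
  if m ≥ g then
    let anterior := pvCell t (m - g) (m - g)
    let actuales := min (f.getD (g - 1) 0) (x.getD (m - 1) 0)
    let antes := pvCell t m (g - 1)
    t.set m ((t.getD m []).set g (max (anterior + actuales) antes))
  else t

def pvFill (x f : List Int) (n : Nat) : List (List Int) :=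
  (List.range' 1 n).foldl (fun t m => (List.range' 1 n).foldl (pvFillStep x f m) t)
    (List.replicate (n + 1) (List.replicate (n + 1) (0 : Int)))

-- A's recursive traceback; the inner 'while i > 1: append CARGAR' loop appends g-1 copies
def obtener_secuencia_estrategias (x f : List Int) (t : List (List Int)) (m g : Nat)
    (acc : List String) : List String :=
  if m = 0 ∨ g = 0 then acc
  else
    let anterior := if m ≥ g then pvCell t (m - g) (m - g) else 0
    let actuales := min (f.getD (g - 1) 0) (x.getD (m - 1) 0)
    let antes := pvCell t m (g - 1)
    if anterior + actuales ≥ antes then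
      obtener_secuencia_estrategias x f t (m - g) (m - g)
        (acc ++ pvATACAR :: List.replicate (g - 1) pvCARGAR)
    else
      obtener_secuencia_estrategias x f t m (g - 1) acc
termination_by (m, g)
decreasing_by
  · exact Prod.Lex.left _ _ (by omega)
  · exact Prod.Lex.right _ (by omega)

def eliminar_enemigos (x : List Int) (f : List Int) : Int × List String :=
  let n := x.length
  let t := pvFill x f n
  let max_enemigos := PySem.List.pyGetD (PySem.List.pyGetD t (-1) []) (-1) 0
  let secuencia := obtener_secuencia_estrategias x f t n n []
  (max_enemigos, secuencia.reverse)

-- ===== PORT B =====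
-- 1-D DP: d[m] = best kills in the first m minutes; built by appending, as in Source B
def pvBuildD (x f : List Int) (n : Nat) : List Int :=
  (List.range' 1 n).foldl (fun d m =>
    let c := x.getD (m - 1) 0
    d ++ [(PySem.List.max?
        ((0 : Int) :: (List.range' 1 m).map (fun j => d.getD (m - j) 0 + min (f.getD (j - 1) 0) c))
        (fun v => v)).getD 0]) [(0 : Int)]

-- the inner scan of Source B's while loop: running (best, arg) with >= tie to the later j
def pvBestArg (x f : List Int) (d : List Int) (m : Nat) : Int × Nat :=
  (List.range' 1 m).foldl (fun p j =>
    let v := d.getD (m - j) 0 + min (f.getD (j - 1) 0) (x.getD (m - 1) 0)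
    if v ≥ p.1 then (v, j) else p) (0, 0)

def pvLoopB (x f : List Int) (d : List Int) (m : Nat) (acc : List String) : List String :=
  if m = 0 then acc
  else
    match pvBestArg x f d m with
    | (_, arg) =>
      if arg = 0 then acc
      else pvLoopB x f d (m - arg) (List.replicate (arg - 1) pvCARGAR ++ pvATACAR :: acc)
termination_by m
decreasing_by omega

def eliminar_enemigos_alt (x : List Int) (f : List Int) : Int × List String :=
  let n := x.length
  let d := pvBuildD x f n
  (d.getD n 0, pvLoopB x f d n [])

-- ===== PRECONDITION & SPEC =====
-- Python A raises IndexError (f[j-1] with j up to len(x)) exactly when len(f) < len(x); B raises there too.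
def Pre_eliminar_enemigos (x : List Int) (f : List Int) : Prop := x.length ≤ f.length
instance (x : List Int) (f : List Int) : Decidable (Pre_eliminar_enemigos x f) := by
  unfold Pre_eliminar_enemigos; infer_instance
def pvWitness_eliminar_enemigos : List Int × List Int := ([3, 1, 4], [1, 2, 5])

def Spec_eliminar_enemigos (x : List Int) (f : List Int) (out : Int × List String) : Prop := out = eliminar_enemigos_alt x f
instance (x : List Int) (f : List Int) (out : Int × List String) : Decidable (Spec_eliminar_enemigos x f out) := by unfold Spec_eliminar_enemigos; infer_instance

-- ===== CLAIM (what is proved, stated in full; the proofs are below) =====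
def Claim_equal_eliminar_enemigos : Prop := ∀ (x : List Int) (f : List Int), Dom_eliminar_enemigos x f → Pre_eliminar_enemigos x f → Spec_eliminar_enemigos x f (eliminar_enemigos x f)

-- ===== LEMMAS AND PROOFS =====

-- the value of table cell (m, g) after the fill: 0-bordered prefix maxima of the diagonal DP
def pvP (x f : List Int) : Nat → Nat → Int
  | _, 0 => 0
  | m, g + 1 =>
    if g + 1 ≤ m then
      max (pvP x f (m - (g + 1)) (m - (g + 1)) + min (f.getD g 0) (x.getD (m - 1) 0)) (pvP x f m g)
    else 0
termination_by m g => (m, g)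
decreasing_by
  · exact Prod.Lex.left _ _ (by omega)
  · exact Prod.Lex.right _ (by omega)

-- the gap A's traceback chooses at minute m scanning g = j..1 (0 = none qualifies)
def pvArg (x f : List Int) (m : Nat) : Nat → Nat
  | 0 => 0
  | j + 1 =>
    if pvP x f (m - (j + 1)) (m - (j + 1)) + min (f.getD j 0) (x.getD (m - 1) 0) ≥ pvP x f m j
    then j + 1 else pvArg x f m j

-- A's traceback output (before the final reverse), phrased on pvP instead of the table
def pvS (x f : List Int) (m g : Nat) : List String :=
  if m = 0 ∨ g = 0 then []
  else
    let anterior := if m ≥ g then pvP x f (m - g) (m - g) else 0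
    let actuales := min (f.getD (g - 1) 0) (x.getD (m - 1) 0)
    if anterior + actuales ≥ pvP x f m (g - 1) then
      (pvATACAR :: List.replicate (g - 1) pvCARGAR) ++ pvS x f (m - g) (m - g)
    else pvS x f m (g - 1)
termination_by (m, g)
decreasing_by
  · exact Prod.Lex.left _ _ (by omega)
  · exact Prod.Lex.right _ (by omega)


-- basic getD bookkeeping specialised to our tables
lemma pvGetD_map_range (φ : Nat → Int) (n i : Nat) (h : i < n) :
    ((List.range n).map φ).getD i 0 = φ i := by
  simp [List.getD_eq_getElem?_getD, h]

lemma pvGetD_set_self (t : List (List Int)) (i : Nat) (r : List Int) (h : i < t.length) :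
    (t.set i r).getD i [] = r := by
  simp [List.getD_eq_getElem?_getD, h]

lemma pvGetD_set_ne (t : List (List Int)) (i j : Nat) (r : List Int) (h : i ≠ j) :
    (t.set i r).getD j [] = t.getD j [] := by
  simp [List.getD_eq_getElem?_getD, h]

lemma pvGetDI_set_self (l : List Int) (i : Nat) (v : Int) (h : i < l.length) :
    (l.set i v).getD i 0 = v := by
  simp [List.getD_eq_getElem?_getD, h]

lemma pvGetDI_set_ne (l : List Int) (i j : Nat) (v : Int) (h : i ≠ j) :
    (l.set i v).getD j 0 = l.getD j 0 := by
  simp [List.getD_eq_getElem?_getD, h]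

lemma pvP_zero_left (x f : List Int) (g : Nat) : pvP x f 0 g = 0 := by
  cases g with
  | zero => rw [pvP]
  | succ k => rw [pvP]; simp

-- running max over the first g candidate gaps is exactly table entry (m, g)
lemma pvMaxFold (x f : List Int) (m : Nat) :
    ∀ g, g ≤ m →
      ((List.range' 1 g).map
        (fun j => pvP x f (m - j) (m - j) + min (f.getD (j - 1) 0) (x.getD (m - 1) 0))).foldl max 0
        = pvP x f m g := by
  intro g
  induction g with
  | zero => intro _; rw [pvP]; rfl
  | succ k ih =>
    intro h
    rw [List.range'_1_concat, List.map_append, List.foldl_append, ih (by omega)]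
    have h1 : 1 + k = k + 1 := Nat.add_comm 1 k
    rw [pvP]
    simp only [h1, List.map_cons, List.map_nil, List.foldl_cons, List.foldl_nil,
      Nat.add_sub_cancel, if_pos h]
    exact max_comm _ _






lemma pvBuildD_spec (x f : List Int) (n : Nat) :
    pvBuildD x f n = (List.range (n + 1)).map (fun m => pvP x f m m) := by
  unfold pvBuildD
  induction n with
  | zero => simp [pvP_zero_left]
  | succ n ih =>
    rw [List.range'_1_concat, List.foldl_append, ih]
    have h1 : 1 + n = n + 1 := Nat.add_comm 1 n
    simp only [List.foldl_cons, List.foldl_nil, h1]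
    have hmap : (List.range' 1 (n + 1)).map
        (fun j => ((List.range (n + 1)).map (fun m => pvP x f m m)).getD (n + 1 - j) 0
          + min (f.getD (j - 1) 0) (x.getD (n + 1 - 1) 0))
        = (List.range' 1 (n + 1)).map
        (fun j => pvP x f (n + 1 - j) (n + 1 - j) + min (f.getD (j - 1) 0) (x.getD (n + 1 - 1) 0)) := by
      apply List.map_congr_left
      intro j hj
      have hj' := List.mem_range'_1.mp hj
      rw [pvGetD_map_range _ _ _ (by omega)]
    rw [hmap, PySem.List.max?_id_cons]
    simp only [Option.getD_some]
    rw [pvMaxFold x f (n + 1) (n + 1) le_rfl]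
    simp [List.range_succ, List.append_assoc]

lemma pvArg_le (x f : List Int) (m : Nat) : ∀ j, pvArg x f m j ≤ j := by
  intro j
  induction j with
  | zero => rw [pvArg]
  | succ k ih =>
    rw [pvArg]
    split
    · exact le_rfl
    · omega

-- the running (best, arg) scan computes (pvP m j, pvArg m j)
lemma pvScan (x f : List Int) (n m : Nat) (hm : m ≤ n) :
    ∀ j, j ≤ m →
      (List.range' 1 j).foldl (fun p j =>
          let v := ((List.range (n + 1)).map (fun m => pvP x f m m)).getD (m - j) 0
            + min (f.getD (j - 1) 0) (x.getD (m - 1) 0)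
          if v ≥ p.1 then (v, j) else p) ((0 : Int), (0 : Nat))
        = (pvP x f m j, pvArg x f m j) := by
  intro j
  induction j with
  | zero => intro _; rw [pvP, pvArg]; simp
  | succ k ih =>
    intro h
    rw [List.range'_1_concat, List.foldl_append, ih (by omega)]
    have h1 : 1 + k = k + 1 := Nat.add_comm 1 k
    simp only [List.foldl_cons, List.foldl_nil, h1,
      pvGetD_map_range _ _ _ (show m - (k + 1) < n + 1 by omega), Nat.add_sub_cancel]
    rw [pvP, pvArg]
    simp only [if_pos (show k + 1 ≤ m by omega)]
    split
    · rename_i hge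
      rw [max_eq_left hge]
    · rename_i hlt
      rw [max_eq_right (by omega)]

lemma pvBestArg_spec (x f : List Int) (n m : Nat) (hm : m ≤ n) :
    pvBestArg x f ((List.range (n + 1)).map (fun m => pvP x f m m)) m
      = (pvP x f m m, pvArg x f m m) := by
  unfold pvBestArg
  exact pvScan x f n m hm m le_rfl

lemma pvS_unfold (x f : List Int) (m : Nat) (hm : 1 ≤ m) :
    ∀ g, g ≤ m →
      pvS x f m g = if pvArg x f m g = 0 then []
        else (pvATACAR :: List.replicate (pvArg x f m g - 1) pvCARGAR)
              ++ pvS x f (m - pvArg x f m g) (m - pvArg x f m g) := by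
  intro g
  induction g with
  | zero =>
    intro _
    rw [pvS, pvArg]
    simp
  | succ k ih =>
    intro h
    rw [pvS, pvArg]
    simp only [Nat.add_sub_cancel]
    rw [if_neg (by omega), if_pos (show m ≥ k + 1 from h)]
    split
    · rename_i hc
      rw [if_neg (by omega)]
      simp
    · rename_i hc
      rw [ih (by omega)]

lemma pvGetD_replicate (r : List Int) (n i : Nat) (h : i < n) :
    (List.replicate n r).getD i [] = r := by
  simp [List.getD_eq_getElem?_getD, h]

lemma pvCell_init (n m g : Nat) :
    pvCell (List.replicate (n + 1) (List.replicate (n + 1) (0 : Int))) m g = 0 := by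
  unfold pvCell
  rcases lt_or_ge m (n + 1) with hm | hm
  · rw [pvGetD_replicate _ _ _ hm]
    rcases lt_or_ge g (n + 1) with hg | hg
    · simp [List.getD_eq_getElem?_getD, hg]
    · exact List.getD_eq_default _ _ (by simpa using hg)
  · have h0 : (List.replicate (n + 1) (List.replicate (n + 1) (0 : Int))).getD m [] = [] :=
      List.getD_eq_default _ _ (by simpa using hm)
    rw [h0]
    simp

-- one inner pass: after processing g = 1..j on row k+1, that row holds pvP up to column j
lemma pvFillRow (x f : List Int) (n k : Nat) (hk : k + 1 ≤ n)
    (t : List (List Int))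
    (hlen : t.length = n + 1)
    (hrow : ∀ i, i ≤ n → (t.getD i []).length = n + 1)
    (hlow : ∀ m g, m ≤ k → g ≤ n → pvCell t m g = pvP x f m g)
    (hhigh : ∀ m g, k + 1 ≤ m → m ≤ n → g ≤ n → pvCell t m g = 0) :
    ∀ j, j ≤ n →
      ((List.range' 1 j).foldl (pvFillStep x f (k + 1)) t).length = n + 1 ∧
      (∀ i, i ≤ n → (((List.range' 1 j).foldl (pvFillStep x f (k + 1)) t).getD i []).length = n + 1) ∧
      (∀ m g, m ≤ k → g ≤ n →
        pvCell ((List.range' 1 j).foldl (pvFillStep x f (k + 1)) t) m g = pvP x f m g) ∧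
      (∀ g, g ≤ n →
        pvCell ((List.range' 1 j).foldl (pvFillStep x f (k + 1)) t) (k + 1) g
          = if g ≤ j then pvP x f (k + 1) g else 0) ∧
      (∀ m g, k + 2 ≤ m → m ≤ n → g ≤ n →
        pvCell ((List.range' 1 j).foldl (pvFillStep x f (k + 1)) t) m g = 0) := by
  intro j
  induction j with
  | zero =>
    intro _
    simp only [List.range'_zero, List.foldl_nil]
    refine ⟨hlen, hrow, fun m g hm hg => hlow m g hm hg, ?_, fun m g h1 h2 h3 => hhigh m g (by omega) h2 h3⟩
    intro g hg
    rw [hhigh (k + 1) g le_rfl hk hg]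
    split
    · rename_i h0
      have hg0 : g = 0 := by omega
      subst hg0
      rw [pvP]
    · rfl
  | succ j ih =>
    intro hj
    obtain ⟨ihlen, ihrow, ihlow, ihdiag, ihhigh⟩ := ih (by omega)
    rw [List.range'_1_concat, List.foldl_append]
    set t' := (List.range' 1 j).foldl (pvFillStep x f (k + 1)) t with ht'
    have h1 : 1 + j = j + 1 := Nat.add_comm 1 j
    simp only [List.foldl_cons, List.foldl_nil, h1]
    by_cases hge : k + 1 ≥ j + 1
    · rw [pvFillStep, if_pos hge]
      have hrowlen : (t'.getD (k + 1) []).length = n + 1 := ihrow (k + 1) hk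
      have hvalv : max (pvCell t' (k + 1 - (j + 1)) (k + 1 - (j + 1))
            + min (f.getD (j + 1 - 1) 0) (x.getD (k + 1 - 1) 0))
            (pvCell t' (k + 1) (j + 1 - 1)) = pvP x f (k + 1) (j + 1) := by
        rw [ihlow (k + 1 - (j + 1)) (k + 1 - (j + 1)) (by omega) (by omega)]
        simp only [Nat.add_sub_cancel]
        rw [ihdiag j (by omega), if_pos le_rfl]
        rw [pvP, if_pos hge]
        simp
      refine ⟨by simpa using ihlen, ?_, ?_, ?_, ?_⟩
      · intro i hi
        by_cases hik : i = k + 1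
        · subst hik
          rw [pvGetD_set_self _ _ _ (by omega)]
          simpa using hrowlen
        · rw [pvGetD_set_ne _ _ _ _ (fun h => hik h.symm)]
          exact ihrow i hi
      · intro m g hm hg
        unfold pvCell
        rw [pvGetD_set_ne _ _ _ _ (by omega)]
        exact ihlow m g hm hg
      · intro g hg
        unfold pvCell
        rw [pvGetD_set_self _ _ _ (by omega)]
        by_cases hgj : g = j + 1
        · subst hgj
          rw [pvGetDI_set_self _ _ _ (by omega), if_pos le_rfl]
          exact hvalv.symm ▸ rfl
        · rw [pvGetDI_set_ne _ _ _ _ (fun h => hgj h.symm)]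
          have := ihdiag g hg
          unfold pvCell at this
          rw [this]
          by_cases hgle : g ≤ j
          · rw [if_pos hgle, if_pos (by omega)]
          · rw [if_neg hgle, if_neg (by omega)]
      · intro m g hm1 hm2 hg
        unfold pvCell
        rw [pvGetD_set_ne _ _ _ _ (by omega)]
        exact ihhigh m g hm1 hm2 hg
    · rw [pvFillStep, if_neg hge]
      refine ⟨ihlen, ihrow, ihlow, ?_, ihhigh⟩
      intro g hg
      rw [ihdiag g hg]
      by_cases hgle : g ≤ j
      · rw [if_pos hgle, if_pos (by omega)]
      · rw [if_neg hgle]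
        by_cases hgj : g = j + 1
        · subst hgj
          rw [if_pos le_rfl, pvP, if_neg (by omega)]
        · rw [if_neg (by omega)]

lemma pvFillOuter (x f : List Int) (n : Nat) :
    ∀ k, k ≤ n →
      ((List.range' 1 k).foldl (fun t m => (List.range' 1 n).foldl (pvFillStep x f m) t)
          (List.replicate (n + 1) (List.replicate (n + 1) (0 : Int)))).length = n + 1 ∧
      (∀ i, i ≤ n →
        (((List.range' 1 k).foldl (fun t m => (List.range' 1 n).foldl (pvFillStep x f m) t)
          (List.replicate (n + 1) (List.replicate (n + 1) (0 : Int)))).getD i []).length = n + 1) ∧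
      (∀ m g, m ≤ k → g ≤ n →
        pvCell ((List.range' 1 k).foldl (fun t m => (List.range' 1 n).foldl (pvFillStep x f m) t)
          (List.replicate (n + 1) (List.replicate (n + 1) (0 : Int)))) m g = pvP x f m g) ∧
      (∀ m g, k + 1 ≤ m → m ≤ n → g ≤ n →
        pvCell ((List.range' 1 k).foldl (fun t m => (List.range' 1 n).foldl (pvFillStep x f m) t)
          (List.replicate (n + 1) (List.replicate (n + 1) (0 : Int)))) m g = 0) := by
  intro k
  induction k with
  | zero =>
    intro _
    simp only [List.range'_zero, List.foldl_nil]
    refine ⟨by simp, ?_, ?_, ?_⟩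
    · intro i hi
      rw [pvGetD_replicate _ _ _ (by omega)]
      simp
    · intro m g hm hg
      have hm0 : m = 0 := by omega
      subst hm0
      rw [pvCell_init, pvP_zero_left]
    · intro m g _ _ _
      exact pvCell_init n m g
  | succ k ih =>
    intro hk
    obtain ⟨ihlen, ihrow, ihlow, ihhigh⟩ := ih (by omega)
    rw [List.range'_1_concat, List.foldl_append]
    have h1 : 1 + k = k + 1 := Nat.add_comm 1 k
    simp only [List.foldl_cons, List.foldl_nil, h1]
    obtain ⟨rlen, rrow, rlow, rdiag, rhigh⟩ :=
      pvFillRow x f n k hk _ ihlen ihrow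
        (fun m g hm hg => ihlow m g hm hg)
        (fun m g h1 h2 h3 => ihhigh m g h1 h2 h3) n le_rfl
    refine ⟨rlen, rrow, ?_, fun m g h1 h2 h3 => rhigh m g (by omega) h2 h3⟩
    intro m g hm hg
    by_cases hmk : m = k + 1
    · subst hmk
      rw [rdiag g hg, if_pos hg]
    · exact rlow m g (by omega) hg

lemma pvFill_spec (x f : List Int) (n : Nat) :
    (pvFill x f n).length = n + 1 ∧
    (∀ i, i ≤ n → ((pvFill x f n).getD i []).length = n + 1) ∧
    (∀ m g, m ≤ n → g ≤ n → pvCell (pvFill x f n) m g = pvP x f m g) := by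
  obtain ⟨hlen, hrow, hlow, _⟩ := pvFillOuter x f n n le_rfl
  exact ⟨hlen, hrow, fun m g hm hg => hlow m g hm hg⟩

lemma pvLoopB_spec (x f : List Int) (n : Nat) :
    ∀ m, m ≤ n → ∀ acc,
      pvLoopB x f ((List.range (n + 1)).map (fun m => pvP x f m m)) m acc
        = (pvS x f m m).reverse ++ acc := by
  intro m
  induction m using Nat.strong_induction_on with
  | _ m ih =>
    intro hm acc
    rw [pvLoopB]
    by_cases hm0 : m = 0
    · subst hm0
      rw [pvS]
      simp
    · rw [if_neg hm0, pvBestArg_spec x f n m hm]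
      simp only
      have hs := pvS_unfold x f m (by omega) m le_rfl
      have ha := pvArg_le x f m m
      by_cases h0 : pvArg x f m m = 0
      · rw [if_pos h0]
        rw [hs, if_pos h0]
        simp
      · rw [if_neg h0]
        rw [ih (m - pvArg x f m m) (by omega) (by omega),
          hs, if_neg h0]
        simp

lemma obtener_spec (x f : List Int) (n : Nat) :
    ∀ m, m ≤ n → ∀ g, g ≤ n → ∀ acc,
      obtener_secuencia_estrategias x f (pvFill x f n) m g acc = acc ++ pvS x f m g := by
  have hcell := (pvFill_spec x f n).2.2
  intro m
  induction m using Nat.strong_induction_on with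
  | _ m ihm =>
    intro hm g
    induction g with
    | zero =>
      intro _ acc
      rw [obtener_secuencia_estrategias, pvS]
      simp
    | succ k ihg =>
      intro hg acc
      by_cases hm0 : m = 0
      · rw [obtener_secuencia_estrategias, pvS,
            if_pos (Or.inl hm0), if_pos (Or.inl hm0)]
        simp
      · rw [obtener_secuencia_estrategias, pvS]
        have hcond : ¬(m = 0 ∨ k + 1 = 0) := by omega
        rw [if_neg hcond]
        simp only [Nat.add_sub_cancel]
        have e1 : pvCell (pvFill x f n) m k = pvP x f m k := hcell m k hm (by omega)
        have e2 : pvCell (pvFill x f n) (m - (k + 1)) (m - (k + 1))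
            = pvP x f (m - (k + 1)) (m - (k + 1)) := hcell _ _ (by omega) (by omega)
        rw [e1, e2]
        split <;> split
        · rw [ihm (m - (k + 1)) (by omega) (by omega) (m - (k + 1)) (by omega)]
          simp
        · exact ihg (by omega) acc
        · rw [ihm (m - (k + 1)) (by omega) (by omega) (m - (k + 1)) (by omega)]
          simp
        · exact ihg (by omega) acc

-- ===== VERDICT (by name: the statement is the Claim_ definition above) =====
theorem eliminar_enemigos_spec : Claim_equal_eliminar_enemigos := by
  unfold Claim_equal_eliminar_enemigos
  intro x f _ _
  unfold Spec_eliminar_enemigos eliminar_enemigos eliminar_enemigos_alt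
  simp only []
  obtain ⟨hlen, hrow, hcell⟩ := pvFill_spec x f x.length
  have hne : pvFill x f x.length ≠ [] := by
    intro h
    rw [h] at hlen
    simp at hlen
  have hrlen : ((pvFill x f x.length).getD x.length []).length = x.length + 1 :=
    hrow x.length le_rfl
  have hrne : (pvFill x f x.length).getD x.length [] ≠ [] := by
    intro h
    rw [h] at hrlen
    simp at hrlen
  have h1 : PySem.List.pyGetD (pvFill x f x.length) (-1) [] = (pvFill x f x.length).getD x.length [] := by
    rw [PySem.List.pyGetD_neg_one _ _ hne, List.getLast_eq_getElem,
      List.getD_eq_getElem _ _ (show x.length < (pvFill x f x.length).length by omega)]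
    congr 1
    omega
  have h2 : PySem.List.pyGetD ((pvFill x f x.length).getD x.length []) (-1) 0 = pvP x f x.length x.length := by
    rw [PySem.List.pyGetD_neg_one _ _ hrne, List.getLast_eq_getElem,
      ← hcell x.length x.length le_rfl le_rfl]
    unfold pvCell
    rw [List.getD_eq_getElem _ _ (show x.length < ((pvFill x f x.length).getD x.length []).length by omega)]
    congr 1
    omega
  rw [h1, h2, pvBuildD_spec,
    pvGetD_map_range _ _ _ (show x.length < x.length + 1 by omega),
    pvLoopB_spec x f x.length x.length le_rfl [],
    obtener_spec x f x.length x.length le_rfl x.length le_rfl []]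
  simp
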